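-- pv_equiv track=rewrite | github.com/aakarshsingh1217/All-That-Dice | allThatDice.py | determineOverallWinner
-- ===== SOURCE A (Python) =====
-- def determineOverallWinner(roundWinners, totalScores, totalBuncos):
--     """
--     Determines the overall winner of the Bunco game based on the number of rounds won,
--     total scores, and Buncos. In case of a tie in rounds won, total scores and Buncos are used as tiebreakers.
--
--     Args:
--         roundWinners (list): A list of player names who won each round.
--         totalScores (dict): A dictionary mapping player names to their total scores.
--         totalBuncos (dict): A dictionary mapping player names to their total number of Buncos.
--
--     Returns:
--         str: The name of the overall winner.
--     """
--     roundWins = {player: roundWinners.count(player) for player in totalScores.keys()}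
--     maxRoundsWon = max(roundWins.values())
--     potentialWinners = [player for player, wins in roundWins.items() if wins == maxRoundsWon]
--
--     if len(potentialWinners) == 1:
--         return potentialWinners[0]
--     else:
--         highestScore = max(totalScores[player] for player in potentialWinners)
--         potentialWinners = [player for player in potentialWinners if totalScores[player] == highestScore]
--
--         if len(potentialWinners) > 1:
--             highestBuncos = max(totalBuncos[player] for player in potentialWinners)
--             potentialWinners = [player for player in potentialWinners if totalBuncos[player] == highestBuncos]
--
--         return potentialWinners[0]
-- ===== SOURCE B (Python) =====
-- def determineOverallWinner(roundWinners, totalScores, totalBuncos):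
--     wins = {p: 0 for p in totalScores}
--     for w in roundWinners:
--         if w in wins:
--             wins[w] += 1
--     return max(totalScores, key=lambda p: (wins[p], totalScores[p], totalBuncos.get(p, 0)))
-- ===== Notes on version B (the rewrite author's own statement) =====
-- stated objective: simpler
-- what changed: Replaces the per-player roundWinners.count scans and the three staged max/filter/branch tie-break blocks with one counting pass over roundWinners and a single max over a lexicographic (wins, score, buncos) tuple key.
import Mathlib
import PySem

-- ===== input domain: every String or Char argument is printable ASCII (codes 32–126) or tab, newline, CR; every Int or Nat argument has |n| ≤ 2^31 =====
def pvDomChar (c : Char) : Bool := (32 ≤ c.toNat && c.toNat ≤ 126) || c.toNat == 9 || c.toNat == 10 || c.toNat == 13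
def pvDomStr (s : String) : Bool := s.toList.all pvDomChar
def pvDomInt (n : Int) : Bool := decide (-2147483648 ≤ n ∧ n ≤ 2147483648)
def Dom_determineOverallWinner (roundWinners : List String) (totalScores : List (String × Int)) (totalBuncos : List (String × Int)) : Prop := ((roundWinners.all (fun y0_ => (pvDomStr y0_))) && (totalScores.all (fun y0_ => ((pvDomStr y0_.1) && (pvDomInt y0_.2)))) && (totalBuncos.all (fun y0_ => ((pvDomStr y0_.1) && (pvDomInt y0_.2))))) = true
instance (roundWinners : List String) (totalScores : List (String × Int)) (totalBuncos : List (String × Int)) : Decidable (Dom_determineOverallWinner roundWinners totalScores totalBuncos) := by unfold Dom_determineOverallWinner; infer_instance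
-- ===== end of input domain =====

-- B replaces A's per-player roundWinners.count scans and staged max/filter/branch tie-breaking by one counting
-- pass plus a single first-maximum scan under a lexicographic (wins, score, buncos) key (simpler, and O(r+p) vs A's O(p*r+p^2)).

-- ===== PORT A =====
def determineOverallWinner (roundWinners : List String) (totalScores : List (String × Int)) (totalBuncos : List (String × Int)) : String :=
  let tsd : PySem.Dict String Int := PySem.Dict.ofList totalScores
  let tbd : PySem.Dict String Int := PySem.Dict.ofList totalBuncos
  let roundWins : PySem.Dict String Int :=
    tsd.keys.foldl (fun d p => d.insert p (roundWinners.count p : Int)) PySem.Dict.empty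
  let maxRoundsWon : Int :=
    match PySem.List.max? roundWins.values (fun v => v) with
    | some m => m
    | none => 0  -- Python: max() of empty values raises ValueError; excluded by Pre_
  let potentialWinners : List String :=
    (roundWins.items.filter (fun pw => pw.2 == maxRoundsWon)).map (fun pw => pw.1)
  if potentialWinners.length == 1 then
    potentialWinners.headD ""
  else
    let highestScore : Int :=
      match PySem.List.max? (potentialWinners.map (fun p => tsd.getD p 0)) (fun v => v) with
      | some m => m
      | none => 0
    let pw2 := potentialWinners.filter (fun p => tsd.getD p 0 == highestScore)
    if pw2.length > 1 then
      let highestBuncos : Int :=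
        match PySem.List.max? (pw2.map (fun p => tbd.getD p 0)) (fun v => v) with
        | some m => m
        | none => 0
      let pw3 := pw2.filter (fun p => tbd.getD p 0 == highestBuncos)
      pw3.headD ""
    else
      pw2.headD ""

-- ===== PORT B =====
-- Python's tuple comparison inside 'max(..., key=...)': lexicographic strict 'greater' on Int triples
def pvLexGt (a b : Int × Int × Int) : Bool :=
  a.1 > b.1 || (a.1 == b.1 && (a.2.1 > b.2.1 || (a.2.1 == b.2.1 && a.2.2 > b.2.2)))

def determineOverallWinner_alt (roundWinners : List String) (totalScores : List (String × Int)) (totalBuncos : List (String × Int)) : String :=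
  let tsd : PySem.Dict String Int := PySem.Dict.ofList totalScores
  let tbd : PySem.Dict String Int := PySem.Dict.ofList totalBuncos
  let wins0 : PySem.Dict String Int :=
    tsd.keys.foldl (fun d p => d.insert p (0 : Int)) PySem.Dict.empty
  let wins : PySem.Dict String Int :=
    roundWinners.foldl (fun d w => if d.contains w then d.modify w 0 (· + 1) else d) wins0
  let key : String → Int × Int × Int := fun p => (wins.getD p 0, tsd.getD p 0, tbd.getD p 0)
  -- max(totalScores, key=...): first element of the dict's keys whose key tuple is maximal
  match tsd.keys with
  | [] => ""  -- Python: max() of an empty dict raises ValueError; excluded by Pre_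
  | k :: rest => rest.foldl (fun best p => if pvLexGt (key p) (key best) then p else best) k

-- ===== PRECONDITION & SPEC =====
-- Pre_ excludes exactly the inputs on which CPython's A raises: an empty totalScores (ValueError from
-- max() of an empty sequence) and the inputs where at least two players tie on (round wins, score) and a
-- tying maximal player is missing from totalBuncos (KeyError in A's Bunco stage); on those KeyError
-- inputs B's totalBuncos.get(p, 0) instead returns the first maximal player, counting the missing Buncos as 0.
def Pre_determineOverallWinner (roundWinners : List String) (totalScores : List (String × Int)) (totalBuncos : List (String × Int)) : Prop :=
  totalScores ≠ [] ∧
  ∀ p ∈ totalScores.map Prod.fst,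
    ((∀ q ∈ totalScores.map Prod.fst,
        roundWinners.count q < roundWinners.count p ∨
          (roundWinners.count q = roundWinners.count p ∧
            (PySem.Dict.ofList totalScores).getD q 0 ≤ (PySem.Dict.ofList totalScores).getD p 0)) ∧
      (∃ q ∈ totalScores.map Prod.fst, q ≠ p ∧
        roundWinners.count q = roundWinners.count p ∧
        (PySem.Dict.ofList totalScores).getD q 0 = (PySem.Dict.ofList totalScores).getD p 0)) →
    p ∈ totalBuncos.map Prod.fst
instance (roundWinners : List String) (totalScores : List (String × Int)) (totalBuncos : List (String × Int)) : Decidable (Pre_determineOverallWinner roundWinners totalScores totalBuncos) := by unfold Pre_determineOverallWinner; infer_instance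

def pvWitness_determineOverallWinner : List String × (List (String × Int)) × (List (String × Int)) :=
  (["a"], [("a", 1)], [("a", 0)])

def Spec_determineOverallWinner (roundWinners : List String) (totalScores : List (String × Int)) (totalBuncos : List (String × Int)) (out : String) : Prop := out = determineOverallWinner_alt roundWinners totalScores totalBuncos
instance (roundWinners : List String) (totalScores : List (String × Int)) (totalBuncos : List (String × Int)) (out : String) : Decidable (Spec_determineOverallWinner roundWinners totalScores totalBuncos out) := by unfold Spec_determineOverallWinner; infer_instance

-- ===== CLAIM (what is proved, stated in full; the proofs are below) =====
def Claim_equal_determineOverallWinner : Prop := ∀ (roundWinners : List String) (totalScores : List (String × Int)) (totalBuncos : List (String × Int)), Dom_determineOverallWinner roundWinners totalScores totalBuncos → Pre_determineOverallWinner roundWinners totalScores totalBuncos → Spec_determineOverallWinner roundWinners totalScores totalBuncos (determineOverallWinner roundWinners totalScores totalBuncos)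

-- ===== LEMMAS AND PROOFS =====

-- the two component key functions both programs tie-break with, and the lexicographic composite
def pvCnt (rwn : List String) (p : String) : Int := (rwn.count p : Int)
def pvWin (rwn : List String) (ts : List (String × Int)) (p : String) : Int :=
  if p ∈ (PySem.Dict.ofList ts).keys then pvCnt rwn p else 0
def pvG (rwn : List String) (ts tb : List (String × Int)) (p : String) : Lex (Int × Lex (Int × Int)) :=
  toLex (pvWin rwn ts p, toLex ((PySem.Dict.ofList ts).getD p 0, (PySem.Dict.ofList tb).getD p 0))

-- the common canonical value: first key of totalScores with lexicographically maximal (wins, score, buncos)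
def pvArgmax (rwn : List String) (ts tb : List (String × Int)) : String :=
  ((PySem.Dict.ofList ts).keys.filter
    (fun p => decide (∀ y ∈ (PySem.Dict.ofList ts).keys, pvG rwn ts tb y ≤ pvG rwn ts tb p))).headD ""

-- B's wins dictionary, as a standalone value for the proofs
def pvWinsD (rwn : List String) (ts : List (String × Int)) : PySem.Dict String Int :=
  rwn.foldl (fun d w => if d.contains w then d.modify w 0 (· + 1) else d)
    ((PySem.Dict.ofList ts).keys.foldl (fun d p => d.insert p (0 : Int)) PySem.Dict.empty)

theorem pvKeysNodup {ν : Type} (l : List (String × ν)) : (PySem.Dict.ofList l).keys.Nodup := by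
  have h := PySem.Dict.nodup_keys_foldl_insert_key (ν := ν) l Prod.fst (fun _ p => p.2)
      PySem.Dict.empty (by simp)
  exact h

theorem pvKeysEq {ν : Type} (l : List (String × ν)) :
    (PySem.Dict.ofList l).keys = PySem.Set.ofList (l.map Prod.fst) := by
  have h := PySem.Dict.keys_foldl_insert_key (ν := ν) l Prod.fst (fun _ p => p.2) PySem.Dict.empty
  exact h

theorem pvKeysNeNil {ν : Type} (l : List (String × ν)) (h : l ≠ []) :
    (PySem.Dict.ofList l).keys ≠ [] := by
  rw [pvKeysEq]
  obtain ⟨p, t, rfl⟩ := List.exists_cons_of_ne_nil h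
  exact List.ne_nil_of_mem ((PySem.Set.mem_ofList _ p.1).mpr (by simp))

-- a nonempty list has an element of maximal key
theorem pvExistsArgmax {α κ : Type} [LinearOrder κ] (g : α → κ) :
    ∀ (k : α) (l : List α), ∃ x ∈ k :: l, ∀ y ∈ k :: l, g y ≤ g x := by
  intro k l
  induction l generalizing k with
  | nil => exact ⟨k, by simp⟩
  | cons p t ih =>
    obtain ⟨x, hx, hmax⟩ := ih p
    rcases le_total (g k) (g x) with h | h
    · refine ⟨x, List.mem_cons_of_mem _ hx, ?_⟩
      intro y hy
      rcases List.mem_cons.mp hy with rfl | hy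
      · exact h
      · exact hmax y hy
    · refine ⟨k, List.mem_cons_self, ?_⟩
      intro y hy
      rcases List.mem_cons.mp hy with rfl | hy
      · exact le_rfl
      · exact le_trans (hmax y hy) h

-- Python's first-maximum loop returns the head of the sublist of key-maximal elements
theorem pvFoldArgmax {α κ : Type} [LinearOrder κ] (g : α → κ) :
    ∀ (rest : List α) (k : α),
      rest.foldl (fun b p => if g b < g p then p else b) k
        = ((k :: rest).filter (fun p => decide (∀ y ∈ k :: rest, g y ≤ g p))).headD k := by
  intro rest
  induction rest with
  | nil => intro k; simp
  | cons p t ih =>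
    intro k
    rw [List.foldl_cons]
    by_cases h : g k < g p
    · rw [if_pos h, ih p]
      have hk : (decide (∀ y ∈ k :: p :: t, g y ≤ g k)) = false := by
        simp only [decide_eq_false_iff_not]
        intro hall
        exact absurd (hall p (by simp)) (not_le.mpr h)
      have hcongr : ∀ x ∈ p :: t,
          (decide (∀ y ∈ p :: t, g y ≤ g x)) = (decide (∀ y ∈ k :: p :: t, g y ≤ g x)) := by
        intro x _
        simp only [decide_eq_decide]
        constructor
        · intro hall y hy
          rcases List.mem_cons.mp hy with rfl | hy
          · exact le_trans (le_of_lt h) (hall p (by simp))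
          · exact hall y hy
        · intro hall y hy
          exact hall y (List.mem_cons_of_mem _ hy)
      have e1 : (k :: p :: t).filter (fun q => decide (∀ y ∈ k :: p :: t, g y ≤ g q))
          = (p :: t).filter (fun q => decide (∀ y ∈ k :: p :: t, g y ≤ g q)) := by
        simp only [List.filter_cons, hk]
        simp
      rw [e1, ← List.filter_congr hcongr]
      obtain ⟨x, hx, hmax⟩ := pvExistsArgmax g p t
      have hne : (p :: t).filter (fun q => decide (∀ y ∈ p :: t, g y ≤ g q)) ≠ [] := by
        apply List.ne_nil_of_mem (a := x)
        rw [List.mem_filter]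
        exact ⟨hx, by simpa using hmax⟩
      obtain ⟨z, zs, hz⟩ := List.exists_cons_of_ne_nil hne
      rw [hz]
      simp
    · rw [if_neg h, ih k]
      have hpk : g p ≤ g k := not_lt.mp h
      by_cases hp : ∀ y ∈ k :: p :: t, g y ≤ g p
      · have hkmax : ∀ y ∈ k :: p :: t, g y ≤ g k := fun y hy => le_trans (hp y hy) hpk
        have h1 : (decide (∀ y ∈ k :: p :: t, g y ≤ g k)) = true := by
          simpa using hkmax
        have h2 : (decide (∀ y ∈ k :: t, g y ≤ g k)) = true := by
          simp only [decide_eq_true_eq]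
          intro y hy
          rcases List.mem_cons.mp hy with rfl | hy
          · exact le_rfl
          · exact hkmax y (by simp [hy])
        have eL : (k :: t).filter (fun q => decide (∀ y ∈ k :: t, g y ≤ g q))
            = k :: t.filter (fun q => decide (∀ y ∈ k :: t, g y ≤ g q)) := by
          rw [List.filter_cons, if_pos h2]
        have eR : (k :: p :: t).filter (fun q => decide (∀ y ∈ k :: p :: t, g y ≤ g q))
            = k :: (p :: t).filter (fun q => decide (∀ y ∈ k :: p :: t, g y ≤ g q)) := by
          rw [List.filter_cons, if_pos h1]
        rw [eL, eR]
        rfl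
      · have hP2p : (decide (∀ y ∈ k :: p :: t, g y ≤ g p)) = false := by
          simpa using hp
        have e1 : (k :: p :: t).filter (fun q => decide (∀ y ∈ k :: p :: t, g y ≤ g q))
            = (k :: t).filter (fun q => decide (∀ y ∈ k :: p :: t, g y ≤ g q)) := by
          cases hPk : (decide (∀ y ∈ k :: p :: t, g y ≤ g k)) with
          | true =>
            calc (k :: p :: t).filter (fun q => decide (∀ y ∈ k :: p :: t, g y ≤ g q))
                = k :: (p :: t).filter (fun q => decide (∀ y ∈ k :: p :: t, g y ≤ g q)) := by
                  rw [List.filter_cons, if_pos hPk]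
              _ = k :: t.filter (fun q => decide (∀ y ∈ k :: p :: t, g y ≤ g q)) := by
                  rw [List.filter_cons, if_neg (by simp only [hP2p]; exact Bool.false_ne_true)]
              _ = (k :: t).filter (fun q => decide (∀ y ∈ k :: p :: t, g y ≤ g q)) := by
                  rw [List.filter_cons, if_pos hPk]
          | false =>
            calc (k :: p :: t).filter (fun q => decide (∀ y ∈ k :: p :: t, g y ≤ g q))
                = (p :: t).filter (fun q => decide (∀ y ∈ k :: p :: t, g y ≤ g q)) := by
                  rw [List.filter_cons, if_neg (by simp only [hPk]; exact Bool.false_ne_true)]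
              _ = t.filter (fun q => decide (∀ y ∈ k :: p :: t, g y ≤ g q)) := by
                  rw [List.filter_cons, if_neg (by simp only [hP2p]; exact Bool.false_ne_true)]
              _ = (k :: t).filter (fun q => decide (∀ y ∈ k :: p :: t, g y ≤ g q)) := by
                  rw [List.filter_cons, if_neg (by simp only [hPk]; exact Bool.false_ne_true)]
        have hcongr : ∀ x ∈ k :: t,
            (decide (∀ y ∈ k :: t, g y ≤ g x)) = (decide (∀ y ∈ k :: p :: t, g y ≤ g x)) := by
          intro x hxm
          simp only [decide_eq_decide]
          constructor
          · intro hall y hy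
            rcases List.mem_cons.mp hy with h1 | h1
            · subst h1; exact hall _ (by simp)
            · rcases List.mem_cons.mp h1 with h2 | h2
              · subst h2; exact le_trans hpk (hall k (by simp))
              · exact hall y (by simp [h2])
          · intro hall y hy
            rcases List.mem_cons.mp hy with h1 | h1
            · subst h1; exact hall _ (by simp)
            · exact hall y (by simp [h1])
        rw [e1, ← List.filter_congr hcongr]

-- the lexicographically maximal elements = staged filtering (first component, then the second)
theorem pvLexStage {α κ1 κ2 : Type} [LinearOrder κ1] [LinearOrder κ2] (f1 : α → κ1) (f2 : α → κ2) (ks : List α) :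
    ks.filter (fun p => decide (∀ y ∈ ks, toLex (f1 y, f2 y) ≤ toLex (f1 p, f2 p)))
      = (ks.filter (fun p => decide (∀ y ∈ ks, f1 y ≤ f1 p))).filter
          (fun p => decide (∀ y ∈ ks.filter (fun q => decide (∀ z ∈ ks, f1 z ≤ f1 q)), f2 y ≤ f2 p)) := by
  rw [List.filter_filter]
  apply List.filter_congr
  intro p hp
  rw [Bool.eq_iff_iff]
  simp only [Bool.and_eq_true, decide_eq_true_eq, List.mem_filter, Prod.Lex.le_iff, ofLex_toLex]
  constructor
  · intro hall
    have h1 : ∀ y ∈ ks, f1 y ≤ f1 p := by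
      intro y hy
      rcases hall y hy with h | ⟨h, _⟩
      · exact le_of_lt h
      · exact le_of_eq h
    refine ⟨?_, by exact h1⟩
    intro y ⟨hy1, hy2⟩
    have heq : f1 y = f1 p := le_antisymm (h1 y hy1) (hy2 p hp)
    rcases hall y hy1 with h | ⟨_, h⟩
    · exact absurd h (by simp [heq])
    · exact h
  · rintro ⟨houter, hinner⟩ y hy
    have h1 := hinner y hy
    rcases lt_or_eq_of_le h1 with h | h
    · exact Or.inl h
    · refine Or.inr ⟨h, ?_⟩
      apply houter
      refine ⟨hy, ?_⟩
      intro z hz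
      exact le_of_le_of_eq (hinner z hz) h.symm

-- Python's tuple comparison agrees with the Lex order
theorem pvLexGt_eq (a b : Int × Int × Int) :
    pvLexGt a b
      = decide (toLex (b.1, toLex (b.2.1, b.2.2)) < toLex (a.1, toLex (a.2.1, a.2.2))) := by
  rw [Bool.eq_iff_iff]
  simp only [pvLexGt, Bool.or_eq_true, Bool.and_eq_true, decide_eq_true_eq, beq_iff_eq,
    gt_iff_lt, Prod.Lex.lt_iff, ofLex_toLex]
  tauto

-- the counting loop of B
theorem pvWinsLoop (l : List String) :
    ∀ (d : PySem.Dict String Int) (p : String),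
      (l.foldl (fun d w => if d.contains w then d.modify w 0 (· + 1) else d) d).getD p 0
        = d.getD p 0 + (if d.contains p then (l.count p : Int) else 0) := by
  induction l with
  | nil => intro d p; simp
  | cons a t ih =>
    intro d p
    rw [List.foldl_cons]
    by_cases hc : d.contains a
    · rw [if_pos hc, ih]
      have hck : (d.modify a 0 (· + 1)).contains p = d.contains p := by
        rw [PySem.Dict.contains_modify]
        by_cases h : p = a
        · simp [h, hc]
        · simp [h]
      rw [hck, PySem.Dict.getD_modify]
      by_cases hpa : p = a
      · subst hpa
        simp only [if_pos rfl, hc, if_true, List.count_cons, beq_self_eq_true]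
        push_cast
        ring
      · simp only [if_neg hpa, List.count_cons]
        have : (a == p) = false := by simp [Ne.symm hpa]
        simp [this]
    · rw [if_neg hc, ih]
      by_cases hpa : p = a
      · subst hpa
        simp [hc]
      · have : (a == p) = false := by simp [Ne.symm hpa]
        simp [List.count_cons, this]

-- B's wins dict computes pvWin
theorem pvWinsD_getD (rwn : List String) (ts : List (String × Int)) (p : String) :
    (pvWinsD rwn ts).getD p 0 = pvWin rwn ts p := by
  unfold pvWinsD pvWin
  rw [pvWinsLoop]
  have hnd : (PySem.Dict.ofList ts).keys.Nodup := pvKeysNodup ts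
  have hitems : ((PySem.Dict.ofList ts).keys.foldl (fun d p => d.insert p (0 : Int)) PySem.Dict.empty).items
      = (PySem.Dict.ofList ts).keys.map (fun p => (p, (0 : Int))) := by
    have h := PySem.Dict.items_foldl_insert_fresh (PySem.Dict.ofList ts).keys (fun x => x)
      (fun _ => (0 : Int)) PySem.Dict.empty (by intro a _; rfl) (by simpa using hnd)
    simpa using h
  have hkeys : ((PySem.Dict.ofList ts).keys.foldl (fun d p => d.insert p (0 : Int)) PySem.Dict.empty).keys
      = (PySem.Dict.ofList ts).keys := by
    show ((PySem.Dict.ofList ts).keys.foldl (fun d p => d.insert p (0 : Int)) PySem.Dict.empty).items.map Prod.fst = _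
    rw [hitems, List.map_map]
    have e : (Prod.fst ∘ fun p : String => (p, (0 : Int))) = fun p : String => p := rfl
    rw [e]
    simp
  by_cases hmem : p ∈ (PySem.Dict.ofList ts).keys
  · have hcont : ((PySem.Dict.ofList ts).keys.foldl (fun d p => d.insert p (0 : Int)) PySem.Dict.empty).contains p = true := by
      rw [PySem.Dict.contains_iff_mem_keys, hkeys]; exact hmem
    have hget : ((PySem.Dict.ofList ts).keys.foldl (fun d p => d.insert p (0 : Int)) PySem.Dict.empty).getD p 0 = 0 := by
      apply PySem.Dict.getD_of_mem_items
      · rw [hitems, List.mem_map]; exact ⟨p, hmem, rfl⟩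
      · rw [hkeys]; exact hnd
    rw [hget, hcont]
    simp [hmem, pvCnt]
  · have hcont : ((PySem.Dict.ofList ts).keys.foldl (fun d p => d.insert p (0 : Int)) PySem.Dict.empty).contains p = false := by
      rw [Bool.eq_false_iff]
      intro hcon
      rw [PySem.Dict.contains_iff_mem_keys, hkeys] at hcon
      exact hmem hcon
    have hget : ((PySem.Dict.ofList ts).keys.foldl (fun d p => d.insert p (0 : Int)) PySem.Dict.empty).getD p 0 = 0 :=
      PySem.Dict.getD_of_not_contains _ _ hcont
    rw [hget, hcont]
    simp [hmem]

-- a max? -based '== max' filter is the maximality filter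
theorem pvFilterMaxEq (f : String → Int) (l : List String) (m : Int)
    (hM : PySem.List.max? (l.map f) (fun v => v) = some m) :
    l.filter (fun p => f p == m) = l.filter (fun p => decide (∀ y ∈ l, f y ≤ f p)) := by
  have hle : ∀ y ∈ l, f y ≤ m := by
    intro y hy
    exact PySem.List.max?_isMax hM _ (List.mem_map_of_mem hy)
  have hmem : ∃ y ∈ l, f y = m := by
    have h := PySem.List.max?_mem hM
    rw [List.mem_map] at h
    obtain ⟨y, hy, he⟩ := h
    exact ⟨y, hy, he⟩
  apply List.filter_congr
  intro p hp
  rw [Bool.eq_iff_iff]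
  simp only [beq_iff_eq, decide_eq_true_eq]
  constructor
  · intro h y hy
    rw [h]
    exact hle y hy
  · intro hmax
    obtain ⟨y0, hy0, he⟩ := hmem
    exact le_antisymm (hle p hp) (he ▸ hmax y0 hy0)

-- A's round-wins dictionary, as a standalone value for the proofs
def pvRW (rwn : List String) (ts : List (String × Int)) : PySem.Dict String Int :=
  (PySem.Dict.ofList ts).keys.foldl (fun d p => d.insert p (rwn.count p : Int)) PySem.Dict.empty

theorem pvMaxAux {f : Option Int → Int → Option Int}
    (hf : ∀ m x, f (some m) x ≠ none) :
    ∀ (t : List Int) (m : Int), t.foldl f (some m) ≠ none := by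
  intro t
  induction t with
  | nil => intro m; simp
  | cons a t2 ih =>
    intro m
    rw [List.foldl_cons]
    cases hfa : f (some m) a with
    | none => exact absurd hfa (hf m a)
    | some y => exact ih y

theorem pvMaxSome (l : List Int) (h : l ≠ []) :
    ∃ m, PySem.List.max? l (fun v => v) = some m := by
  obtain ⟨x, t, rfl⟩ := List.exists_cons_of_ne_nil h
  cases hM : PySem.List.max? (x :: t) (fun v => v) with
  | some m => exact ⟨m, rfl⟩
  | none =>
    exact absurd hM (pvMaxAux (fun m x => by by_cases hx : m < x <;> simp [hx]) t x)

theorem pvLenOne {l : List String} (h : l.length = 1) : ∃ a, l = [a] := by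
  cases l with
  | nil => simp at h
  | cons a t =>
    cases t with
    | nil => exact ⟨a, rfl⟩
    | cons b t2 => simp at h

theorem pvFilterMapFst (rwn : List String) (l : List String) (W : Int) :
    ((l.map (fun p => (p, (rwn.count p : Int)))).filter (fun pw => pw.2 == W)).map (fun pw => pw.1)
      = l.filter (fun p => (rwn.count p : Int) == W) := by
  induction l with
  | nil => rfl
  | cons a t ih => by_cases h : ((rwn.count a : Int) == W) = true <;> simp [List.filter_cons, h, ih]

-- A equals the canonical first lexicographic argmax
theorem pvA_eq (rwn : List String) (ts tb : List (String × Int)) (hts : ts ≠ []) :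
    determineOverallWinner rwn ts tb = pvArgmax rwn ts tb := by
  have hnd : (PySem.Dict.ofList ts).keys.Nodup := pvKeysNodup ts
  have hkne : (PySem.Dict.ofList ts).keys ≠ [] := pvKeysNeNil ts hts
  have hitems : (pvRW rwn ts).items = (PySem.Dict.ofList ts).keys.map (fun p => (p, (rwn.count p : Int))) := by
    have h := PySem.Dict.items_foldl_insert_fresh (PySem.Dict.ofList ts).keys (fun x => x)
      (fun p => (rwn.count p : Int)) PySem.Dict.empty (fun a _ => rfl) (by simpa using hnd)
    simpa using h
  have hvals : (pvRW rwn ts).values = (PySem.Dict.ofList ts).keys.map (fun p => (rwn.count p : Int)) := by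
    show (pvRW rwn ts).items.map Prod.snd = _
    rw [hitems, List.map_map]
    rfl
  have hA : determineOverallWinner rwn ts tb = (if (((pvRW rwn ts).items.filter (fun pw => pw.2 == (match PySem.List.max? (pvRW rwn ts).values (fun v => v) with | some m => m | none => 0))).map (fun pw => pw.1)).length == 1 then (((pvRW rwn ts).items.filter (fun pw => pw.2 == (match PySem.List.max? (pvRW rwn ts).values (fun v => v) with | some m => m | none => 0))).map (fun pw => pw.1)).headD "" else if ((((pvRW rwn ts).items.filter (fun pw => pw.2 == (match PySem.List.max? (pvRW rwn ts).values (fun v => v) with | some m => m | none => 0))).map (fun pw => pw.1)).filter (fun p => (PySem.Dict.ofList ts).getD p 0 == (match PySem.List.max? ((((pvRW rwn ts).items.filter (fun pw => pw.2 == (match PySem.List.max? (pvRW rwn ts).values (fun v => v) with | some m => m | none => 0))).map (fun pw => pw.1)).map (fun p => (PySem.Dict.ofList ts).getD p 0)) (fun v => v) with | some m => m | none => 0))).length > 1 then (((((pvRW rwn ts).items.filter (fun pw => pw.2 == (match PySem.List.max? (pvRW rwn ts).values (fun v => v) with | some m => m | none => 0))).map (fun pw => pw.1)).filter (fun p =>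 (PySem.Dict.ofList ts).getD p 0 == (match PySem.List.max? ((((pvRW rwn ts).items.filter (fun pw => pw.2 == (match PySem.List.max? (pvRW rwn ts).values (fun v => v) with | some m => m | none => 0))).map (fun pw => pw.1)).map (fun p => (PySem.Dict.ofList ts).getD p 0)) (fun v => v) with | some m => m | none => 0))).filter (fun p => (PySem.Dict.ofList tb).getD p 0 == (match PySem.List.max? (((((pvRW rwn ts).items.filter (fun pw => pw.2 == (match PySem.List.max? (pvRW rwn ts).values (fun v => v) with | some m => m | none => 0))).map (fun pw => pw.1)).filter (fun p => (PySem.Dict.ofList ts).getD p 0 == (match PySem.List.max? ((((pvRW rwn ts).items.filter (fun pw => pw.2 == (match PySem.List.max? (pvRW rwn ts).values (fun v => v) with | some m => m | none => 0))).map (fun pw => pw.1)).map (fun p => (PySem.Dict.ofList ts).getD p 0)) (fun v => v) with | some m => m | none => 0))).map (fun p => (PySem.Dict.ofList tb).getD p 0)) (fun v => v) with | some m => m | none => 0))).headD "" else ((((pvRW rwn ts).items.filter (fun pw => pw.2 == (match PySem.List.max? (pvRW rwn ts).values (fun v => v) with | some m => m | none => 0))).map (fun pw => pw.1)).filter (fun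 p => (PySem.Dict.ofList ts).getD p 0 == (match PySem.List.max? ((((pvRW rwn ts).items.filter (fun pw => pw.2 == (match PySem.List.max? (pvRW rwn ts).values (fun v => v) with | some m => m | none => 0))).map (fun pw => pw.1)).map (fun p => (PySem.Dict.ofList ts).getD p 0)) (fun v => v) with | some m => m | none => 0))).headD "") := rfl
  rw [hA, hvals]
  obtain ⟨W, hMW⟩ : ∃ W, PySem.List.max? ((PySem.Dict.ofList ts).keys.map (fun p => (rwn.count p : Int))) (fun v => v) = some W := by
    apply pvMaxSome
    simpa using hkne
  have hW : (match PySem.List.max? ((PySem.Dict.ofList ts).keys.map (fun p => (rwn.count p : Int))) (fun v => v) with | some m => m | none => 0) = W := by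
    rw [hMW]
  rw [hW, hitems, pvFilterMapFst rwn (PySem.Dict.ofList ts).keys W]
  have hWle : ∀ y ∈ (PySem.Dict.ofList ts).keys, (rwn.count y : Int) ≤ W :=
    fun y hy => PySem.List.max?_isMax hMW _ (List.mem_map_of_mem hy)
  have hWex : ∃ y ∈ (PySem.Dict.ofList ts).keys, (rwn.count y : Int) = W := by
    have h := PySem.List.max?_mem hMW
    rw [List.mem_map] at h
    exact h
  have hP1 : (PySem.Dict.ofList ts).keys.filter (fun p => (rwn.count p : Int) == W) = ((PySem.Dict.ofList ts).keys.filter (fun p => decide (∀ y ∈ (PySem.Dict.ofList ts).keys, (rwn.count y : Int) ≤ (rwn.count p : Int)))) :=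
    pvFilterMaxEq (fun p => (rwn.count p : Int)) (PySem.Dict.ofList ts).keys W hMW
  rw [hP1]
  have hP1ne : ((PySem.Dict.ofList ts).keys.filter (fun p => decide (∀ y ∈ (PySem.Dict.ofList ts).keys, (rwn.count y : Int) ≤ (rwn.count p : Int)))) ≠ [] := by
    obtain ⟨y0, hy0, he⟩ := hWex
    apply List.ne_nil_of_mem (a := y0)
    rw [List.mem_filter]
    refine ⟨hy0, ?_⟩
    simp only [decide_eq_true_eq]
    intro y hy
    rw [he]
    exact hWle y hy
  have hArg : pvArgmax rwn ts tb = ((((PySem.Dict.ofList ts).keys.filter (fun p => decide (∀ y ∈ (PySem.Dict.ofList ts).keys, (rwn.count y : Int) ≤ (rwn.count p : Int)))).filter (fun p => decide (∀ y ∈ ((PySem.Dict.ofList ts).keys.filter (fun p => decide (∀ y ∈ (PySem.Dict.ofList ts).keys, (rwn.count y : Int) ≤ (rwn.count p : Int)))), (PySem.Dict.ofList ts).getD y 0 ≤ (PySem.Dict.ofList ts).getD p 0))).filter (fun p => decide (∀ y ∈ (((PySem.Dict.ofList ts).keys.filter (fun p => decide (∀ y ∈ (PySem.Dict.ofList ts).keys,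 (rwn.count y : Int) ≤ (rwn.count p : Int)))).filter (fun p => decide (∀ y ∈ ((PySem.Dict.ofList ts).keys.filter (fun p => decide (∀ y ∈ (PySem.Dict.ofList ts).keys, (rwn.count y : Int) ≤ (rwn.count p : Int)))), (PySem.Dict.ofList ts).getD y 0 ≤ (PySem.Dict.ofList ts).getD p 0))), (PySem.Dict.ofList tb).getD y 0 ≤ (PySem.Dict.ofList tb).getD p 0))).headD "" := by
    unfold pvArgmax
    have hc : (PySem.Dict.ofList ts).keys.filter (fun p => decide (∀ y ∈ (PySem.Dict.ofList ts).keys, pvG rwn ts tb y ≤ pvG rwn ts tb p))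
        = (PySem.Dict.ofList ts).keys.filter (fun p => decide (∀ y ∈ (PySem.Dict.ofList ts).keys, toLex ((rwn.count y : Int), toLex ((PySem.Dict.ofList ts).getD y 0, (PySem.Dict.ofList tb).getD y 0)) ≤ toLex ((rwn.count p : Int), toLex ((PySem.Dict.ofList ts).getD p 0, (PySem.Dict.ofList tb).getD p 0)))) := by
      apply List.filter_congr
      intro p hp
      simp only [decide_eq_decide]
      have e : ∀ z ∈ (PySem.Dict.ofList ts).keys, pvG rwn ts tb z = toLex ((rwn.count z : Int), toLex ((PySem.Dict.ofList ts).getD z 0, (PySem.Dict.ofList tb).getD z 0)) := by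
        intro z hz
        simp [pvG, pvWin, pvCnt, hz]
      constructor
      · intro h y hy
        rw [← e y hy, ← e p hp]
        exact h y hy
      · intro h y hy
        rw [e y hy, e p hp]
        exact h y hy
    rw [hc]
    have hst1 : (PySem.Dict.ofList ts).keys.filter (fun p => decide (∀ y ∈ (PySem.Dict.ofList ts).keys, toLex ((rwn.count y : Int), toLex ((PySem.Dict.ofList ts).getD y 0, (PySem.Dict.ofList tb).getD y 0)) ≤ toLex ((rwn.count p : Int), toLex ((PySem.Dict.ofList ts).getD p 0, (PySem.Dict.ofList tb).getD p 0))))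
        = ((PySem.Dict.ofList ts).keys.filter (fun p => decide (∀ y ∈ (PySem.Dict.ofList ts).keys, (rwn.count y : Int) ≤ (rwn.count p : Int)))).filter (fun p => decide (∀ y ∈ ((PySem.Dict.ofList ts).keys.filter (fun p => decide (∀ y ∈ (PySem.Dict.ofList ts).keys, (rwn.count y : Int) ≤ (rwn.count p : Int)))), toLex ((PySem.Dict.ofList ts).getD y 0, (PySem.Dict.ofList tb).getD y 0) ≤ toLex ((PySem.Dict.ofList ts).getD p 0, (PySem.Dict.ofList tb).getD p 0))) :=
      pvLexStage (fun p => (rwn.count p : Int)) (fun p => toLex ((PySem.Dict.ofList ts).getD p 0, (PySem.Dict.ofList tb).getD p 0)) (PySem.Dict.ofList ts).keys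
    rw [hst1]
    have hst2 : ((PySem.Dict.ofList ts).keys.filter (fun p => decide (∀ y ∈ (PySem.Dict.ofList ts).keys, (rwn.count y : Int) ≤ (rwn.count p : Int)))).filter (fun p => decide (∀ y ∈ ((PySem.Dict.ofList ts).keys.filter (fun p => decide (∀ y ∈ (PySem.Dict.ofList ts).keys, (rwn.count y : Int) ≤ (rwn.count p : Int)))), toLex ((PySem.Dict.ofList ts).getD y 0, (PySem.Dict.ofList tb).getD y 0) ≤ toLex ((PySem.Dict.ofList ts).getD p 0, (PySem.Dict.ofList tb).getD p 0)))
        = (((PySem.Dict.ofList ts).keys.filter (fun p => decide (∀ y ∈ (PySem.Dict.ofList ts).keys, (rwn.count y : Int) ≤ (rwn.count p : Int)))).filter (fun p => decide (∀ y ∈ ((PySem.Dict.ofList ts).keys.filter (fun p => decide (∀ y ∈ (PySem.Dict.ofList ts).keys, (rwn.count y : Int) ≤ (rwn.count p : Int)))), (PySem.Dict.ofList ts).getD y 0 ≤ (PySem.Dict.ofList ts).getD p 0))).filter (fun p => decide (∀ y ∈ (((PySem.Dict.ofList ts).keys.filter (fun p => decide (∀ y ∈ (PySem.Dict.ofList ts).keys,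 (rwn.count y : Int) ≤ (rwn.count p : Int)))).filter (fun p => decide (∀ y ∈ ((PySem.Dict.ofList ts).keys.filter (fun p => decide (∀ y ∈ (PySem.Dict.ofList ts).keys, (rwn.count y : Int) ≤ (rwn.count p : Int)))), (PySem.Dict.ofList ts).getD y 0 ≤ (PySem.Dict.ofList ts).getD p 0))), (PySem.Dict.ofList tb).getD y 0 ≤ (PySem.Dict.ofList tb).getD p 0)) :=
      pvLexStage (fun p => (PySem.Dict.ofList ts).getD p 0) (fun p => (PySem.Dict.ofList tb).getD p 0) ((PySem.Dict.ofList ts).keys.filter (fun p => decide (∀ y ∈ (PySem.Dict.ofList ts).keys, (rwn.count y : Int) ≤ (rwn.count p : Int))))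
    rw [hst2]
  rw [hArg]
  by_cases hb1 : (((PySem.Dict.ofList ts).keys.filter (fun p => decide (∀ y ∈ (PySem.Dict.ofList ts).keys, (rwn.count y : Int) ≤ (rwn.count p : Int)))).length == 1) = true
  · rw [if_pos hb1]
    obtain ⟨a, ha⟩ := pvLenOne (eq_of_beq hb1)
    rw [ha]
    simp
  · rw [if_neg hb1]
    obtain ⟨Sm, hMS⟩ : ∃ Sm, PySem.List.max? (((PySem.Dict.ofList ts).keys.filter (fun p => decide (∀ y ∈ (PySem.Dict.ofList ts).keys, (rwn.count y : Int) ≤ (rwn.count p : Int)))).map (fun p => (PySem.Dict.ofList ts).getD p 0)) (fun v => v) = some Sm := by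
      apply pvMaxSome
      simpa using hP1ne
    have hS : (match PySem.List.max? (((PySem.Dict.ofList ts).keys.filter (fun p => decide (∀ y ∈ (PySem.Dict.ofList ts).keys, (rwn.count y : Int) ≤ (rwn.count p : Int)))).map (fun p => (PySem.Dict.ofList ts).getD p 0)) (fun v => v) with | some m => m | none => 0) = Sm := by
      rw [hMS]
    rw [hS]
    have hP2e : ((PySem.Dict.ofList ts).keys.filter (fun p => decide (∀ y ∈ (PySem.Dict.ofList ts).keys, (rwn.count y : Int) ≤ (rwn.count p : Int)))).filter (fun p => (PySem.Dict.ofList ts).getD p 0 == Sm) = (((PySem.Dict.ofList ts).keys.filter (fun p => decide (∀ y ∈ (PySem.Dict.ofList ts).keys, (rwn.count y : Int) ≤ (rwn.count p : Int)))).filter (fun p => decide (∀ y ∈ ((PySem.Dict.ofList ts).keys.filter (fun p => decide (∀ y ∈ (PySem.Dict.ofList ts).keys, (rwn.count y : Int) ≤ (rwn.count p : Int)))), (PySem.Dict.ofList ts).getD y 0 ≤ (PySem.Dict.ofList ts).getD p 0))) :=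
      pvFilterMaxEq (fun p => (PySem.Dict.ofList ts).getD p 0) ((PySem.Dict.ofList ts).keys.filter (fun p => decide (∀ y ∈ (PySem.Dict.ofList ts).keys, (rwn.count y : Int) ≤ (rwn.count p : Int)))) Sm hMS
    rw [hP2e]
    have hSle : ∀ y ∈ ((PySem.Dict.ofList ts).keys.filter (fun p => decide (∀ y ∈ (PySem.Dict.ofList ts).keys, (rwn.count y : Int) ≤ (rwn.count p : Int)))), (PySem.Dict.ofList ts).getD y 0 ≤ Sm :=
      fun y hy => PySem.List.max?_isMax hMS _ (List.mem_map_of_mem hy)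
    have hSex : ∃ y ∈ ((PySem.Dict.ofList ts).keys.filter (fun p => decide (∀ y ∈ (PySem.Dict.ofList ts).keys, (rwn.count y : Int) ≤ (rwn.count p : Int)))), (PySem.Dict.ofList ts).getD y 0 = Sm := by
      have h := PySem.List.max?_mem hMS
      rw [List.mem_map] at h
      exact h
    have hP2ne : (((PySem.Dict.ofList ts).keys.filter (fun p => decide (∀ y ∈ (PySem.Dict.ofList ts).keys, (rwn.count y : Int) ≤ (rwn.count p : Int)))).filter (fun p => decide (∀ y ∈ ((PySem.Dict.ofList ts).keys.filter (fun p => decide (∀ y ∈ (PySem.Dict.ofList ts).keys, (rwn.count y : Int) ≤ (rwn.count p : Int)))), (PySem.Dict.ofList ts).getD y 0 ≤ (PySem.Dict.ofList ts).getD p 0))) ≠ [] := by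
      obtain ⟨y0, hy0, he⟩ := hSex
      apply List.ne_nil_of_mem (a := y0)
      rw [List.mem_filter]
      refine ⟨hy0, ?_⟩
      simp only [decide_eq_true_eq]
      intro y hy
      rw [he]
      exact hSle y hy
    by_cases hb2 : (((PySem.Dict.ofList ts).keys.filter (fun p => decide (∀ y ∈ (PySem.Dict.ofList ts).keys, (rwn.count y : Int) ≤ (rwn.count p : Int)))).filter (fun p => decide (∀ y ∈ ((PySem.Dict.ofList ts).keys.filter (fun p => decide (∀ y ∈ (PySem.Dict.ofList ts).keys, (rwn.count y : Int) ≤ (rwn.count p : Int)))), (PySem.Dict.ofList ts).getD y 0 ≤ (PySem.Dict.ofList ts).getD p 0))).length > 1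
    · rw [if_pos hb2]
      obtain ⟨Um, hMU⟩ : ∃ Um, PySem.List.max? ((((PySem.Dict.ofList ts).keys.filter (fun p => decide (∀ y ∈ (PySem.Dict.ofList ts).keys, (rwn.count y : Int) ≤ (rwn.count p : Int)))).filter (fun p => decide (∀ y ∈ ((PySem.Dict.ofList ts).keys.filter (fun p => decide (∀ y ∈ (PySem.Dict.ofList ts).keys, (rwn.count y : Int) ≤ (rwn.count p : Int)))), (PySem.Dict.ofList ts).getD y 0 ≤ (PySem.Dict.ofList ts).getD p 0))).map (fun p => (PySem.Dict.ofList tb).getD p 0)) (fun v => v) = some Um := by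
        apply pvMaxSome
        simpa using hP2ne
      have hU : (match PySem.List.max? ((((PySem.Dict.ofList ts).keys.filter (fun p => decide (∀ y ∈ (PySem.Dict.ofList ts).keys, (rwn.count y : Int) ≤ (rwn.count p : Int)))).filter (fun p => decide (∀ y ∈ ((PySem.Dict.ofList ts).keys.filter (fun p => decide (∀ y ∈ (PySem.Dict.ofList ts).keys, (rwn.count y : Int) ≤ (rwn.count p : Int)))), (PySem.Dict.ofList ts).getD y 0 ≤ (PySem.Dict.ofList ts).getD p 0))).map (fun p => (PySem.Dict.ofList tb).getD p 0)) (fun v => v) with | some m => m | none => 0) = Um := by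
        rw [hMU]
      rw [hU]
      have hP3e : (((PySem.Dict.ofList ts).keys.filter (fun p => decide (∀ y ∈ (PySem.Dict.ofList ts).keys, (rwn.count y : Int) ≤ (rwn.count p : Int)))).filter (fun p => decide (∀ y ∈ ((PySem.Dict.ofList ts).keys.filter (fun p => decide (∀ y ∈ (PySem.Dict.ofList ts).keys, (rwn.count y : Int) ≤ (rwn.count p : Int)))), (PySem.Dict.ofList ts).getD y 0 ≤ (PySem.Dict.ofList ts).getD p 0))).filter (fun p => (PySem.Dict.ofList tb).getD p 0 == Um) = (((PySem.Dict.ofList ts).keys.filter (fun p => decide (∀ y ∈ (PySem.Dict.ofList ts).keys, (rwn.count y : Int) ≤ (rwn.count p : Int)))).filter (fun p => decide (∀ y ∈ ((PySem.Dict.ofList ts).keys.filter (fun p => decide (∀ y ∈ (PySem.Dict.ofList ts).keys, (rwn.count y : Int) ≤ (rwn.count p : Int)))), (PySem.Dict.ofList ts).getD y 0 ≤ (PySem.Dict.ofList ts).getD p 0))).filter (fun p => decide (∀ y ∈ (((PySem.Dict.ofList ts).keys.filter (fun p => decide (∀ y ∈ (PySem.Dict.ofList ts).keys, (rwn.count y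 : Int) ≤ (rwn.count p : Int)))).filter (fun p => decide (∀ y ∈ ((PySem.Dict.ofList ts).keys.filter (fun p => decide (∀ y ∈ (PySem.Dict.ofList ts).keys, (rwn.count y : Int) ≤ (rwn.count p : Int)))), (PySem.Dict.ofList ts).getD y 0 ≤ (PySem.Dict.ofList ts).getD p 0))), (PySem.Dict.ofList tb).getD y 0 ≤ (PySem.Dict.ofList tb).getD p 0)) :=
        pvFilterMaxEq (fun p => (PySem.Dict.ofList tb).getD p 0) (((PySem.Dict.ofList ts).keys.filter (fun p => decide (∀ y ∈ (PySem.Dict.ofList ts).keys, (rwn.count y : Int) ≤ (rwn.count p : Int)))).filter (fun p => decide (∀ y ∈ ((PySem.Dict.ofList ts).keys.filter (fun p => decide (∀ y ∈ (PySem.Dict.ofList ts).keys, (rwn.count y : Int) ≤ (rwn.count p : Int)))), (PySem.Dict.ofList ts).getD y 0 ≤ (PySem.Dict.ofList ts).getD p 0))) Um hMU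
      rw [hP3e]
    · rw [if_neg hb2]
      have hpos : 0 < (((PySem.Dict.ofList ts).keys.filter (fun p => decide (∀ y ∈ (PySem.Dict.ofList ts).keys, (rwn.count y : Int) ≤ (rwn.count p : Int)))).filter (fun p => decide (∀ y ∈ ((PySem.Dict.ofList ts).keys.filter (fun p => decide (∀ y ∈ (PySem.Dict.ofList ts).keys, (rwn.count y : Int) ≤ (rwn.count p : Int)))), (PySem.Dict.ofList ts).getD y 0 ≤ (PySem.Dict.ofList ts).getD p 0))).length := List.length_pos_of_ne_nil hP2ne
      have hlen : (((PySem.Dict.ofList ts).keys.filter (fun p => decide (∀ y ∈ (PySem.Dict.ofList ts).keys, (rwn.count y : Int) ≤ (rwn.count p : Int)))).filter (fun p => decide (∀ y ∈ ((PySem.Dict.ofList ts).keys.filter (fun p => decide (∀ y ∈ (PySem.Dict.ofList ts).keys, (rwn.count y : Int) ≤ (rwn.count p : Int)))), (PySem.Dict.ofList ts).getD y 0 ≤ (PySem.Dict.ofList ts).getD p 0))).length = 1 := by omega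
      obtain ⟨a, ha⟩ := pvLenOne hlen
      rw [ha]
      simp

-- B equals the canonical first lexicographic argmax
theorem pvB_eq (rwn : List String) (ts tb : List (String × Int)) (hts : ts ≠ []) :
    determineOverallWinner_alt rwn ts tb = pvArgmax rwn ts tb := by
  have hB : determineOverallWinner_alt rwn ts tb =
      (match (PySem.Dict.ofList ts).keys with
       | [] => ""
       | k :: rest => rest.foldl (fun best p =>
           if pvLexGt ((pvWinsD rwn ts).getD p 0, (PySem.Dict.ofList ts).getD p 0, (PySem.Dict.ofList tb).getD p 0)
                      ((pvWinsD rwn ts).getD best 0, (PySem.Dict.ofList ts).getD best 0, (PySem.Dict.ofList tb).getD best 0)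
           then p else best) k) := rfl
  rcases hks : (PySem.Dict.ofList ts).keys with _ | ⟨k, rest⟩
  · exact absurd hks (pvKeysNeNil ts hts)
  · rw [hB, hks]
    show rest.foldl (fun best p =>
        if pvLexGt ((pvWinsD rwn ts).getD p 0, (PySem.Dict.ofList ts).getD p 0, (PySem.Dict.ofList tb).getD p 0)
                   ((pvWinsD rwn ts).getD best 0, (PySem.Dict.ofList ts).getD best 0, (PySem.Dict.ofList tb).getD best 0)
        then p else best) k = pvArgmax rwn ts tb
    have hfun : (fun (best p : String) =>
        if pvLexGt ((pvWinsD rwn ts).getD p 0, (PySem.Dict.ofList ts).getD p 0, (PySem.Dict.ofList tb).getD p 0)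
                   ((pvWinsD rwn ts).getD best 0, (PySem.Dict.ofList ts).getD best 0, (PySem.Dict.ofList tb).getD best 0)
        then p else best)
        = (fun best p => if pvG rwn ts tb best < pvG rwn ts tb p then p else best) := by
      funext best p
      rw [pvLexGt_eq]
      simp only [pvWinsD_getD, decide_eq_true_eq]
      rfl
    rw [hfun, pvFoldArgmax (fun x => pvG rwn ts tb x) rest k]
    unfold pvArgmax
    rw [hks]
    obtain ⟨x, hx, hmax⟩ := pvExistsArgmax (pvG rwn ts tb) k rest
    have hne : (k :: rest).filter (fun p => decide (∀ y ∈ k :: rest, pvG rwn ts tb y ≤ pvG rwn ts tb p)) ≠ [] := by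
      apply List.ne_nil_of_mem (a := x)
      rw [List.mem_filter]
      exact ⟨hx, by simpa using hmax⟩
    obtain ⟨z, zs, hz⟩ := List.exists_cons_of_ne_nil hne
    rw [hz]
    simp

-- ===== VERDICT (by name: the statement is the Claim_ definition above) =====
theorem determineOverallWinner_spec : Claim_equal_determineOverallWinner := by
  intro rwn ts tb _ hpre
  unfold Spec_determineOverallWinner
  rw [pvA_eq rwn ts tb hpre.1, pvB_eq rwn ts tb hpre.1]
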